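-- pv_equiv track=rewrite | github.com/datawhalechina/torch-rechub | torch_rechub/models/generative/rqvae.py | _get_collision_item
-- ===== SOURCE A (Python) =====
-- def _get_collision_item(all_indices_str):
--     """
--     Identify groups of items sharing the same semantic ID (collisions).
--     """
--     index2id = {}
--     for i, index in enumerate(all_indices_str):
--         if index not in index2id:
--             index2id[index] = []
--         index2id[index].append(i)
--
--     collision_item_groups = []
--
--     for index in index2id:
--         if len(index2id[index]) > 1:
--             collision_item_groups.append(index2id[index])
--
--     return collision_item_groups
-- ===== SOURCE B (Python) =====
-- def _get_collision_item(all_indices_str):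
--     """
--     Identify groups of items sharing the same semantic ID (collisions).
--
--     Alternative decomposition: first collect the distinct IDs in order of
--     first occurrence, then rescan the list once per distinct ID to gather
--     its positions, keeping only groups with more than one member.
--     """
--     seen = []
--     for s in all_indices_str:
--         if s not in seen:
--             seen.append(s)
--     groups = ([i for i, t in enumerate(all_indices_str) if t == s] for s in seen)
--     return [g for g in groups if len(g) > 1]
-- ===== Notes on version B (the rewrite author's own statement) =====
-- stated objective: alternative
-- what changed: Instead of accumulating a dict of position lists in one pass, B first collects the distinct IDs in first-occurrence order, then rescans the list once per distinct ID to gather its positions, filtering groups of size > 1.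
import Mathlib
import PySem

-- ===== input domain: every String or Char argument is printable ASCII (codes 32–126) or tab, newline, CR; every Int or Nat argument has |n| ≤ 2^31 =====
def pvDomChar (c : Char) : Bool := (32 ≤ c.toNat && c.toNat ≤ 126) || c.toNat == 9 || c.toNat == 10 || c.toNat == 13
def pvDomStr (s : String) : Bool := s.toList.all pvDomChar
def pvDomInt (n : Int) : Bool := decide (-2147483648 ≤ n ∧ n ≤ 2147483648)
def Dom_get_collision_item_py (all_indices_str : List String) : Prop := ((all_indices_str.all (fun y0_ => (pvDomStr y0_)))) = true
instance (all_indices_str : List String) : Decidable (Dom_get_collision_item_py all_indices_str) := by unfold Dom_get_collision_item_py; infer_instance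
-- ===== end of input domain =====

-- B rescans the list once per distinct ID instead of accumulating a dict of position lists in one pass (objective: alternative decomposition, not faster).

-- ===== PORT A =====
-- loop body of A's first loop: ensure the key exists, then append i to its list
def pvStepA (d : PySem.Dict String (List Int)) (p : Int × String) : PySem.Dict String (List Int) :=
  let d := if d.contains p.2 = true then d else d.insert p.2 ([] : List Int)
  d.insert p.2 (d.getD p.2 [] ++ [p.1])

def get_collision_item_py (all_indices_str : List String) : List (List Int) :=
  let index2id := (PySem.List.enumerate all_indices_str).foldl pvStepA PySem.Dict.empty
  index2id.keys.foldl
    (fun acc index =>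
      if 1 < (index2id.getD index []).length then acc ++ [index2id.getD index []] else acc)
    []

-- ===== PORT B =====
def get_collision_item_py_alt (all_indices_str : List String) : List (List Int) :=
  let seen := all_indices_str.foldl (fun acc s => if s ∈ acc then acc else acc ++ [s]) []
  let groups := seen.map (fun s =>
    (PySem.List.enumerate all_indices_str).filterMap
      (fun p => if p.2 = s then some p.1 else none))
  groups.filter (fun g => decide (1 < g.length))

-- ===== PRECONDITION & SPEC =====
def Spec_get_collision_item_py (all_indices_str : List String) (out : List (List Int)) : Prop := out = get_collision_item_py_alt all_indices_str
instance (all_indices_str : List String) (out : List (List Int)) : Decidable (Spec_get_collision_item_py all_indices_str out) := by unfold Spec_get_collision_item_py; infer_instance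

-- ===== CLAIM (what is proved, stated in full; the proofs are below) =====
def Claim_equal_get_collision_item_py : Prop := ∀ (all_indices_str : List String), Dom_get_collision_item_py all_indices_str → Spec_get_collision_item_py all_indices_str (get_collision_item_py all_indices_str)

-- ===== LEMMAS AND PROOFS =====

-- positions (as Python ints) at which s occurs in xs, counting from k
def pvIdxs : List String → Int → String → List Int
  | [], _, _ => []
  | t :: ts, k, s => if t = s then k :: pvIdxs ts (k + 1) s else pvIdxs ts (k + 1) s

-- the elements of xs not in ks, in first-occurrence order
def pvDedup : List String → List String → List String
  | [], _ => []
  | t :: ts, ks => if t ∈ ks then pvDedup ts ks else t :: pvDedup ts (ks ++ [t])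

-- pure assoc-list picture of pvStepA
def pvBump (l : List (String × List Int)) (s : String) (k : Int) : List (String × List Int) :=
  if s ∈ l.map (·.1) then l.map (fun q => if q.1 = s then (q.1, q.2 ++ [k]) else q)
  else l ++ [(s, [k])]

def pvAddAll : List String → Int → List (String × List Int) → List (String × List Int)
  | [], _, l => l
  | s :: t, k, l => pvAddAll t (k + 1) (pvBump l s k)

def pvCanon : List String → Int → List String → List (String × List Int)
  | [], _, _ => []
  | s :: t, k, ks =>
      if s ∈ ks then pvCanon t (k + 1) ks
      else (s, k :: pvIdxs t (k + 1) s) :: pvCanon t (k + 1) (ks ++ [s])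

theorem mem_pvDedup_not_mem {u : String} : ∀ (xs ks : List String), u ∈ pvDedup xs ks → u ∉ ks := by
  intro xs
  induction xs with
  | nil => intro ks h; simp [pvDedup] at h
  | cons t ts ih =>
    intro ks h
    simp only [pvDedup] at h
    split at h
    · exact ih ks h
    · rcases List.mem_cons.1 h with rfl | h
      · assumption
      · intro hu; exact ih (ks ++ [t]) h (by simp [hu])

theorem nodup_pvDedup : ∀ (xs ks : List String), (pvDedup xs ks).Nodup := by
  intro xs
  induction xs with
  | nil => intro ks; simp [pvDedup]
  | cons t ts ih =>
    intro ks
    simp only [pvDedup]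
    split
    · exact ih ks
    · refine List.nodup_cons.2 ⟨fun h => ?_, ih (ks ++ [t])⟩
      exact mem_pvDedup_not_mem ts (ks ++ [t]) h (by simp)

theorem filterMap_enumerate_eq_pvIdxs (s : String) :
    ∀ (xs : List String) (k : Int),
      (PySem.List.enumerate xs k).filterMap (fun p => if p.2 = s then some p.1 else none)
        = pvIdxs xs k s := by
  intro xs
  induction xs with
  | nil => intro k; simp [PySem.List.enumerate_nil, pvIdxs]
  | cons t ts ih =>
    intro k
    simp only [PySem.List.enumerate_cons, List.filterMap_cons, pvIdxs]
    by_cases h : t = s <;> simp [h, ih]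

theorem foldl_seen : ∀ (xs acc : List String),
    xs.foldl (fun acc s => if s ∈ acc then acc else acc ++ [s]) acc = acc ++ pvDedup xs acc := by
  intro xs
  induction xs with
  | nil => intro acc; simp [pvDedup]
  | cons t ts ih =>
    intro acc
    simp only [List.foldl_cons, pvDedup]
    by_cases h : t ∈ acc
    · simp [h, ih]
    · simp [h, ih (acc ++ [t])]

theorem foldl_filter_append {α β : Type} (p : α → Prop) [DecidablePred p] (g : α → β) :
    ∀ (l : List α) (acc : List β),
      l.foldl (fun acc x => if p x then acc ++ [g x] else acc) acc
        = acc ++ (l.filter (fun x => decide (p x))).map g := by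
  intro l
  induction l with
  | nil => intro acc; simp
  | cons x xs ih =>
    intro acc
    by_cases h : p x <;> simp [h, ih]

theorem pvStepA_items (d : PySem.Dict String (List Int)) (hnd : d.keys.Nodup) (k : Int) (s : String) :
    (pvStepA d (k, s)).items = pvBump d.items s k := by
  unfold pvStepA pvBump
  by_cases h : d.contains s = true
  · have hmem : s ∈ d.items.map (·.1) := by
      have := (PySem.Dict.contains_iff_mem_keys (d := d) (k := s)).1 h
      simpa [PySem.Dict.keys] using this
    simp only [h, if_true, hmem]
    rw [PySem.Dict.items_insert_of_contains _ _ h]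
    apply List.map_congr_left
    intro q hq
    by_cases hqs : q.1 = s
    · have hget : d.getD s [] = q.2 := by
        have : (s, q.2) ∈ d.items := by
          have : q = (s, q.2) := by cases q; simp_all
          rw [← this]; exact hq
        exact PySem.Dict.getD_of_mem_items _ this hnd []
      simp [hqs, hget]
    · simp [hqs]
  · have hf : d.contains s = false := by simpa using h
    have hnmem : s ∉ d.items.map (·.1) := by
      intro hm
      apply h
      exact (PySem.Dict.contains_iff_mem_keys (d := d) (k := s)).2 (by simpa [PySem.Dict.keys] using hm)
    simp only [hf, Bool.false_eq_true, if_false, hnmem]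
    have hg : (d.insert s ([] : List Int)).getD s [] = [] := by
      simp [PySem.Dict.getD_insert_self]
    rw [hg]
    simp only [List.nil_append]
    rw [PySem.Dict.insert_insert_self]
    rw [PySem.Dict.items_insert_of_not_contains _ _ hf]

theorem pvStepA_keys (d : PySem.Dict String (List Int)) (k : Int) (s : String) :
    (pvStepA d (k, s)).keys = if d.contains s = true then d.keys else d.keys ++ [s] := by
  unfold pvStepA
  by_cases h : d.contains s = true
  · simp only [h, if_true]
    exact PySem.Dict.keys_insert_of_contains _ _ h
  · have hf : d.contains s = false := by simpa using h
    simp only [hf, Bool.false_eq_true, if_false]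
    rw [PySem.Dict.keys_insert_of_contains _ _ (PySem.Dict.contains_insert_self _ _ _)]
    exact PySem.Dict.keys_insert_of_not_contains _ _ hf

theorem pvStepA_nodup (d : PySem.Dict String (List Int)) (hnd : d.keys.Nodup) (k : Int) (s : String) :
    (pvStepA d (k, s)).keys.Nodup := by
  rw [pvStepA_keys]
  by_cases h : d.contains s = true
  · simpa [h] using hnd
  · have hm : s ∉ d.keys := fun hm => h ((PySem.Dict.contains_iff_mem_keys (d := d) (k := s)).2 hm)
    simp only [h, Bool.false_eq_true, if_false]
    refine List.Nodup.append hnd (by simp) ?_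
    intro a ha hb
    simp only [List.mem_singleton] at hb
    subst hb
    exact hm ha

theorem items_foldA : ∀ (rest : List String) (k : Int) (d : PySem.Dict String (List Int)),
    d.keys.Nodup →
    ((PySem.List.enumerate rest k).foldl pvStepA d).items = pvAddAll rest k d.items := by
  intro rest
  induction rest with
  | nil => intro k d _; simp [PySem.List.enumerate_nil, pvAddAll]
  | cons s t ih =>
    intro k d hnd
    simp only [PySem.List.enumerate_cons, List.foldl_cons, pvAddAll]
    rw [ih (k + 1) _ (pvStepA_nodup d hnd k s), pvStepA_items d hnd k s]

theorem pvAddAll_eq : ∀ (rest : List String) (k : Int) (l : List (String × List Int)),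
    pvAddAll rest k l
      = l.map (fun q => (q.1, q.2 ++ pvIdxs rest k q.1)) ++ pvCanon rest k (l.map (·.1)) := by
  intro rest
  induction rest with
  | nil => intro k l; simp [pvAddAll, pvCanon, pvIdxs]
  | cons s t ih =>
    intro k l
    simp only [pvAddAll, pvCanon, pvBump]
    by_cases h : s ∈ l.map (·.1)
    · simp only [h, if_true]
      rw [ih]
      congr 1
      · rw [List.map_map]
        apply List.map_congr_left
        intro q _
        by_cases hqs : q.1 = s
        · simp [hqs, pvIdxs, Function.comp]
        · have hsq : ¬ s = q.1 := fun he => hqs he.symm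
          simp [hqs, hsq, pvIdxs, Function.comp]
      · congr 1
        rw [List.map_map]
        apply List.map_congr_left
        intro q _
        by_cases hqs : q.1 = s <;> simp [hqs, Function.comp]
    · simp only [h, if_false]
      rw [ih]
      simp only [List.map_append, List.map_cons, List.map_nil, List.append_assoc]
      congr 1
      · apply List.map_congr_left
        intro q hq
        have hqs : q.1 ≠ s := fun he => h (by rw [← he]; exact List.mem_map_of_mem hq)
        have hsq : ¬ s = q.1 := fun he => hqs he.symm
        simp [pvIdxs, hsq]

theorem pvCanon_eq : ∀ (xs : List String) (k : Int) (ks : List String),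
    pvCanon xs k ks = (pvDedup xs ks).map (fun s => (s, pvIdxs xs k s)) := by
  intro xs
  induction xs with
  | nil => intro k ks; simp [pvCanon, pvDedup]
  | cons s t ih =>
    intro k ks
    simp only [pvCanon, pvDedup]
    by_cases h : s ∈ ks
    · simp only [h, if_true]
      rw [ih]
      apply List.map_congr_left
      intro u hu
      have hus : ¬ s = u := fun he => mem_pvDedup_not_mem t ks hu (he ▸ h)
      simp [pvIdxs, hus]
    · simp only [h, if_false, List.map_cons]
      congr 1
      · simp [pvIdxs]
      · rw [ih]
        apply List.map_congr_left
        intro u hu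
        have hus : ¬ s = u := fun he =>
          mem_pvDedup_not_mem t (ks ++ [s]) hu (by simp [he.symm])
        simp [pvIdxs, hus]

theorem dict_items_eq (xs : List String) :
    ((PySem.List.enumerate xs).foldl pvStepA PySem.Dict.empty).items
      = (pvDedup xs []).map (fun s => (s, pvIdxs xs 0 s)) := by
  rw [items_foldA xs 0 PySem.Dict.empty (by simp [PySem.Dict.keys_empty])]
  have : (PySem.Dict.empty : PySem.Dict String (List Int)).items = [] := rfl
  rw [this, pvAddAll_eq]
  simp [pvCanon_eq]

theorem dict_keys_eq (xs : List String) :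
    ((PySem.List.enumerate xs).foldl pvStepA PySem.Dict.empty).keys = pvDedup xs [] := by
  have h := dict_items_eq xs
  show ((PySem.List.enumerate xs).foldl pvStepA PySem.Dict.empty).items.map (·.1) = _
  rw [h, List.map_map]
  exact List.map_id _

theorem dict_getD_eq (xs : List String) (s : String) (hs : s ∈ pvDedup xs []) :
    ((PySem.List.enumerate xs).foldl pvStepA PySem.Dict.empty).getD s []
      = pvIdxs xs 0 s := by
  apply PySem.Dict.getD_of_mem_items
  · rw [dict_items_eq]
    exact List.mem_map_of_mem hs
  · rw [dict_keys_eq]; exact nodup_pvDedup xs []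

-- ===== VERDICT (by name: the statement is the Claim_ definition above) =====
theorem get_collision_item_py_spec : Claim_equal_get_collision_item_py := by
  intro xs _
  unfold Spec_get_collision_item_py get_collision_item_py get_collision_item_py_alt
  rw [foldl_filter_append (fun index =>
        1 < (((PySem.List.enumerate xs).foldl pvStepA PySem.Dict.empty).getD index []).length)
      (fun index => ((PySem.List.enumerate xs).foldl pvStepA PySem.Dict.empty).getD index [])]
  rw [foldl_seen xs []]
  simp only [List.nil_append, dict_keys_eq]
  have hmapeq : (pvDedup xs []).map (fun s =>
      (PySem.List.enumerate xs).filterMap (fun p => if p.2 = s then some p.1 else none))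
      = (pvDedup xs []).map (fun s => pvIdxs xs 0 s) := by
    apply List.map_congr_left
    intro s _
    exact filterMap_enumerate_eq_pvIdxs s xs 0
  rw [hmapeq, List.filter_map]
  have hfil : (pvDedup xs []).filter
      (fun index => decide (1 < (((PySem.List.enumerate xs).foldl pvStepA PySem.Dict.empty).getD index []).length))
      = (pvDedup xs []).filter ((fun g => decide (1 < g.length)) ∘ (fun s => pvIdxs xs 0 s)) := by
    apply List.filter_congr
    intro s hs
    simp [dict_getD_eq xs s hs, Function.comp]
  rw [hfil]
  apply List.map_congr_left
  intro s hs
  exact dict_getD_eq xs s (List.mem_of_mem_filter hs)
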